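-- pv_equiv track=rewrite | github.com/jsrockford/bibnumsearch | functions.py | convert_to_search
-- ===== SOURCE A (Python) =====
-- def convert_to_search(user_input):
--     # separate digits into LIST
--     num_list = []
--     for i in user_input:
--         num_list.append(i)
--
--     tmp_results = []
--     search_src = []
--     for i in range(0, len(num_list)-1):
--         tmp_list = num_list.copy()
--         if i < len(num_list):
--             tmp_list.insert(i + 1, ":")
--             tmp_results.append(tmp_list)
--             i += 1
--
--     # code to join results into one string per entry
--     a = 0
--     s = ""
--     while a < len(tmp_results):
--         tmp_hold = tmp_results[a]
--         s = "".join(tmp_hold)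
--         search_src.append(s)
--         a += 1
--
--     return search_src     # returns list of formatted scriptures to use in Bible search
-- ===== SOURCE B (Python) =====
-- def convert_to_search(user_input):
--     # single pass: consume characters from the front, keeping a running prefix,
--     # and emit prefix + ":" + remainder directly
--     out = []
--     prefix = ""
--     rest = list(user_input)
--     while len(rest) > 1:
--         prefix += rest.pop(0)
--         out.append(prefix + ":" + "".join(rest))
--     return out
-- ===== Notes on version B (the rewrite author's own statement) =====
-- stated objective: simpler
-- what changed: Replaces A's three passes (explode into a char list, build a copied-and-inserted list of lists via range/insert, then a while loop joining each) with one front-consuming loop threading a running prefix and emitting each output string directly.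
import Mathlib
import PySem

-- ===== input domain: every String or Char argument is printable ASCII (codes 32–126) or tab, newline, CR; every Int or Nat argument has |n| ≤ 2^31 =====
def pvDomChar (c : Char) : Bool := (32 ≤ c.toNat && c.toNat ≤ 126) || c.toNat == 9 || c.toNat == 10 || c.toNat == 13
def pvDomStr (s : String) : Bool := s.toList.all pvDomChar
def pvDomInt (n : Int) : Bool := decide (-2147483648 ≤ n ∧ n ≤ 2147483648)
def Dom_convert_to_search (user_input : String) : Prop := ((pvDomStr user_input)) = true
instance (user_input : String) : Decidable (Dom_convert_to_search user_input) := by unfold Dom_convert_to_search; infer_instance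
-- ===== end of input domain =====

-- B replaces A's three passes (explode into chars, build copied-and-inserted lists, join each)
-- with one front-consuming loop threading a running prefix and emitting each string directly (simpler).

-- ===== PORT A =====
def convert_to_search (user_input : String) : List String :=
  let num_list : List String :=
    user_input.toList.foldl (fun acc c => acc ++ [String.ofList [c]]) []
  let tmp_results : List (List String) :=
    (PySem.List.pyRange 0 ((num_list.length : Int) - 1)).foldl
      (fun acc i =>
        if i < (num_list.length : Int) then
          acc ++ [PySem.List.insert num_list (i + 1) ":"]
        else acc) []
  tmp_results.foldl (fun acc t => acc ++ [PySem.Str.join "" t]) []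

-- ===== PORT B =====
-- running prefix `pre`, remainder `rest`; emits pre+c + ":" + rest' at each step
def pvAltLoop (pre : List Char) (rest : List Char) : List String :=
  match rest with
  | [] => []
  | [_] => []
  | c :: rest' => String.ofList (pre ++ c :: ':' :: rest') :: pvAltLoop (pre ++ [c]) rest'

def convert_to_search_alt (user_input : String) : List String :=
  pvAltLoop [] user_input.toList

-- ===== PRECONDITION & SPEC =====
def Spec_convert_to_search (user_input : String) (out : List String) : Prop := out = convert_to_search_alt user_input
instance (user_input : String) (out : List String) : Decidable (Spec_convert_to_search user_input out) := by unfold Spec_convert_to_search; infer_instance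

-- ===== CLAIM (what is proved, stated in full; the proofs are below) =====
def Claim_equal_convert_to_search : Prop := ∀ (user_input : String), Dom_convert_to_search user_input → Spec_convert_to_search user_input (convert_to_search user_input)

-- ===== LEMMAS AND PROOFS =====

-- B's loop produces exactly the split-at-(i+1) strings
theorem pvAltLoop_eq (rest : List Char) (pre : List Char) :
    pvAltLoop pre rest = (List.range (rest.length - 1)).map
      (fun i => String.ofList (pre ++ rest.take (i+1) ++ ':' :: rest.drop (i+1))) := by
  induction rest generalizing pre with
  | nil => simp [pvAltLoop]
  | cons c t ih =>
    cases t with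
    | nil => simp [pvAltLoop]
    | cons d u =>
      simp [pvAltLoop, List.range_succ_eq_map, ih, List.map_map, Function.comp_def,
        List.take_succ_cons, List.drop_succ_cons, List.append_assoc]

-- list.insert at a nonnegative in-range index
theorem pv_insert_nat {α : Type} (xs : List α) (k : Nat) (v : α) (h : k ≤ xs.length) :
    PySem.List.insert xs (k : Int) v = xs.take k ++ v :: xs.drop k := by
  have hmin : min (k : Int) (xs.length : Int) = (k : Int) := by omega
  simp [PySem.List.insert, PySem.List.sliceIndices, hmin]
  rw [if_neg (by omega : ¬ ((k : Int) < 0))]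
  simp

-- "".join of one-character strings
theorem pv_join_singletons (l : List Char) :
    PySem.Str.join "" (l.map (fun c => String.ofList [c])) = String.ofList l := by
  apply String.toList_injective
  simp [List.map_map, Function.comp_def]

-- A computes the same split-at-(k+1) strings
theorem convert_to_search_eq (s : String) :
    convert_to_search s = (List.range (s.toList.length - 1)).map
      (fun k => String.ofList (s.toList.take (k+1) ++ ':' :: s.toList.drop (k+1))) := by
  unfold convert_to_search
  simp only [PySem.List.foldl_append_singleton_eq_map, List.nil_append, List.length_map]
  set chars := s.toList with hchars
  have hif : (PySem.List.pyRange 0 ((chars.length : Int) - 1)).foldl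
      (fun acc i => if i < (chars.length : Int) then
          acc ++ [PySem.List.insert (chars.map (fun c => String.ofList [c])) (i + 1) ":"] else acc) []
      = (PySem.List.pyRange 0 ((chars.length : Int) - 1)).map
          (fun i => PySem.List.insert (chars.map (fun c => String.ofList [c])) (i + 1) ":") := by
    have h := PySem.List.foldl_append_if (fun i => decide (i < (chars.length : Int)))
      (fun i => PySem.List.insert (chars.map (fun c => String.ofList [c])) (i + 1) ":")
      (PySem.List.pyRange 0 ((chars.length : Int) - 1)) []
    simp only [decide_eq_true_eq, List.nil_append] at h
    rw [h, List.filter_eq_self.mpr]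
    intro i hi
    have := PySem.List.mem_pyRange_one.mp hi
    simp only [decide_eq_true_eq]
    omega
  rw [hif, List.map_map]
  by_cases h0 : chars = []
  · simp [h0]
  · obtain ⟨m, hm⟩ : ∃ m, chars.length = m + 1 :=
      ⟨chars.length - 1, by have := List.length_pos_iff.mpr h0; omega⟩
    rw [hm]
    have hc : ((m + 1 : Nat) : Int) - 1 = ((m : Nat) : Int) := by push_cast; ring
    rw [hc, PySem.List.pyRange_zero_natCast, List.map_map]
    simp only [Nat.add_sub_cancel]
    apply List.map_congr_left
    intro k hk
    have hklt : k < m := List.mem_range.mp hk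
    have hcast : ((k : Int) : Int) + 1 = ((k + 1 : Nat) : Int) := by push_cast; ring
    simp only [Function.comp_def, hcast]
    rw [pv_insert_nat _ (k+1) _ (by simp; omega)]
    have hcolon : (":" : String) = String.ofList [':'] := rfl
    rw [hcolon, ← List.map_take, ← List.map_drop]
    have : (chars.take (k+1)).map (fun c => String.ofList [c]) ++ String.ofList [':'] :: (chars.drop (k+1)).map (fun c => String.ofList [c])
        = (chars.take (k+1) ++ ':' :: chars.drop (k+1)).map (fun c => String.ofList [c]) := by
      simp
    rw [this, pv_join_singletons]

-- ===== VERDICT (by name: the statement is the Claim_ definition above) =====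
theorem convert_to_search_spec : Claim_equal_convert_to_search := by
  intro s _
  unfold Spec_convert_to_search convert_to_search_alt
  rw [convert_to_search_eq, pvAltLoop_eq]
  simp
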